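-- pv_equiv track=rewrite | github.com/jeremyhuiskamp/advent-of-code-2024 | day12.py | distinct_edges
-- ===== SOURCE A (Python) =====
-- from collections.abc import Iterable
--
-- def distinct_edges(boundaries: Iterable[tuple[bool, bool]]) -> int:
--     """
--     A boundary is two plots adjacent to each other that are either
--     in a region or out of it.
--
--     An edge is a run of consecutive boundaries that are the same.
--     """
--     edges = 0
--     prev, cur = None, None
--     for b in boundaries:
--         prev, cur = cur, b
--         if prev != cur and cur[0] ^ cur[1]:
--             edges += 1
--     return edges
-- ===== SOURCE B (Python) =====
-- def distinct_edges(boundaries):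
--     """
--     A boundary is two plots adjacent to each other that are either
--     in a region or out of it.
--
--     An edge is a run of consecutive boundaries that are the same.
--     """
--     # Two-phase decomposition: first collapse consecutive duplicates into the
--     # list of run keys, then count the run keys that are active boundaries.
--     runs = []
--     for b in boundaries:
--         if not runs or runs[-1] != b:
--             runs.append(b)
--     return sum(k[0] != k[1] for k in runs)
-- ===== Notes on version B (the rewrite author's own statement) =====
-- stated objective: alternative
-- what changed: Replaced the prev/cur transition-tracking state machine with a two-phase decomposition: first collapse consecutive duplicate boundaries into a list of run keys, then count the run keys whose two sides differ.
import Mathlib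
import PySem

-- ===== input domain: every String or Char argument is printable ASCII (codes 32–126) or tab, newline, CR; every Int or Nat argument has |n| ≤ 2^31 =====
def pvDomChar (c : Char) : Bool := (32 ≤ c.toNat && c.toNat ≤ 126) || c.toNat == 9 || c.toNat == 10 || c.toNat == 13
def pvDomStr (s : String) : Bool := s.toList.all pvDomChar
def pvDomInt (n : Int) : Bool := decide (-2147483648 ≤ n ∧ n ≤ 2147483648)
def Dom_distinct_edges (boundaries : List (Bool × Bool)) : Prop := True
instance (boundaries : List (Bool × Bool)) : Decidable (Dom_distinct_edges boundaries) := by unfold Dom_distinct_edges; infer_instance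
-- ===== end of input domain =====

-- B replaces A's prev/cur transition state machine by "collapse consecutive duplicates, then count active run keys" (alternative decomposition, same cost).

-- ===== PORT A =====
-- state: (cur, edges); each step sets prev := cur, cur := b and bumps edges on a new active boundary
def distinct_edges (boundaries : List (Bool × Bool)) : Int :=
  (boundaries.foldl
    (fun s b =>
      let prev := s.1
      (some b, if prev ≠ some b ∧ (b.1 ^^ b.2) then s.2 + 1 else s.2))
    ((none : Option (Bool × Bool)), (0 : Int))).2

-- ===== PORT B =====
-- phase 1 of Source B: the loop appending b when runs is empty or its last element differs
def runKeysStep (runs : List (Bool × Bool)) (b : Bool × Bool) : List (Bool × Bool) :=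
  if runs.isEmpty ∨ runs.getLast? ≠ some b then runs ++ [b] else runs

def distinct_edges_alt (boundaries : List (Bool × Bool)) : Int :=
  let runs := boundaries.foldl runKeysStep []
  runs.foldl (fun acc k => acc + (if k.1 ≠ k.2 then 1 else 0)) 0

-- ===== PRECONDITION & SPEC =====
def Spec_distinct_edges (boundaries : List (Bool × Bool)) (out : Int) : Prop := out = distinct_edges_alt boundaries
instance (boundaries : List (Bool × Bool)) (out : Int) : Decidable (Spec_distinct_edges boundaries out) := by unfold Spec_distinct_edges; infer_instance

-- ===== CLAIM (what is proved, stated in full; the proofs are below) =====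
def Claim_equal_distinct_edges : Prop := ∀ (boundaries : List (Bool × Bool)), Dom_distinct_edges boundaries → Spec_distinct_edges boundaries (distinct_edges boundaries)

-- ===== LEMMAS AND PROOFS =====

-- reference: number of run starts (relative to previous element p) that are active
def runStarts (p : Option (Bool × Bool)) : List (Bool × Bool) → Int
  | [] => 0
  | b :: l => (if p ≠ some b ∧ (b.1 ^^ b.2) then 1 else 0) + runStarts (some b) l

-- reference: consecutive dedup relative to previous element p
def dedup (p : Option (Bool × Bool)) : List (Bool × Bool) → List (Bool × Bool)
  | [] => []
  | b :: l => if p = some b then dedup (some b) l else b :: dedup (some b) l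

theorem foldA_eq (l : List (Bool × Bool)) : ∀ (p : Option (Bool × Bool)) (e : Int),
    (l.foldl
      (fun s b =>
        let prev := s.1
        (some b, if prev ≠ some b ∧ (b.1 ^^ b.2) then s.2 + 1 else s.2))
      (p, e)).2 = e + runStarts p l := by
  induction l with
  | nil => intro p e; simp [runStarts]
  | cons b l ih =>
      intro p e
      simp only [List.foldl, runStarts, ih]
      split_ifs <;> omega

theorem foldB_eq (l : List (Bool × Bool)) : ∀ (acc : List (Bool × Bool)),
    l.foldl runKeysStep acc = acc ++ dedup acc.getLast? l := by
  induction l with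
  | nil => intro acc; simp [dedup]
  | cons b l ih =>
      intro acc
      simp only [List.foldl, dedup, runKeysStep]
      by_cases h : acc.getLast? = some b
      · have hne : ¬ acc.isEmpty := by
          cases acc with
          | nil => simp at h
          | cons x xs => simp
        simp [h, hne, ih]
      · have : (acc.isEmpty ∨ acc.getLast? ≠ some b) = True := by simp [h]
        simp only [this, if_true, ih]
        have hl : (acc ++ [b]).getLast? = some b := by
          simp [List.getLast?_append]
        rw [hl]
        simp [h]

theorem sum_shift (l : List (Bool × Bool)) : ∀ (c : Int),
    l.foldl (fun acc k => acc + (if k.1 ≠ k.2 then 1 else 0)) c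
      = c + l.foldl (fun acc k => acc + (if k.1 ≠ k.2 then 1 else 0)) 0 := by
  induction l with
  | nil => intro c; simp
  | cons k l ih =>
      intro c
      simp only [List.foldl]
      rw [ih, ih (0 + _)]
      omega

theorem sum_dedup (l : List (Bool × Bool)) : ∀ (p : Option (Bool × Bool)),
    (dedup p l).foldl (fun acc k => acc + (if k.1 ≠ k.2 then 1 else 0)) 0 = runStarts p l := by
  induction l with
  | nil => intro p; simp [dedup, runStarts]
  | cons b l ih =>
      intro p
      simp only [dedup, runStarts]
      by_cases h : p = some b
      · rw [if_pos h, ih]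
        rw [if_neg (by simp [h])]
        omega
      · rw [if_neg h]
        simp only [List.foldl]
        rw [sum_shift, ih]
        have hb : (if b.1 ≠ b.2 then (1 : Int) else 0)
            = (if p ≠ some b ∧ (b.1 ^^ b.2) then 1 else 0) := by
          rcases b with ⟨x, y⟩
          cases x <;> cases y <;> simp [h]
        rw [hb]
        omega

-- ===== VERDICT (by name: the statement is the Claim_ definition above) =====
theorem distinct_edges_spec : Claim_equal_distinct_edges := by
  intro boundaries _
  unfold Spec_distinct_edges distinct_edges distinct_edges_alt
  rw [foldA_eq, foldB_eq]
  simp only [List.nil_append, List.getLast?_nil]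
  rw [sum_dedup]
  omega
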